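-- pv_equiv track=rewrite | github.com/alooboii/aenets-mine | sae_weightcompress.py | _find_earliest_layer
-- ===== SOURCE A (Python) =====
-- def _find_earliest_layer(layer_names):
--     """
--     Find the earliest layer among injection points.
--     For ResNet-style: layer1 < layer2 < layer3 < layer4
--     """
--     layer_order = ['layer1', 'layer2', 'layer3', 'layer4']
--     earliest_idx = float('inf')
--     earliest_name = None
--
--     for name in layer_names:
--         layer_prefix = name.split('[')[0]  # Handle 'layer2[0]' -> 'layer2'
--         if layer_prefix in layer_order:
--             idx = layer_order.index(layer_prefix)
--             if idx < earliest_idx: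
--                 earliest_idx = idx
--                 earliest_name = layer_prefix
--
--     return earliest_name if earliest_name else layer_names[0]
-- ===== SOURCE B (Python) =====
-- def _find_earliest_layer(layer_names):
--     prefixes = {name.split('[')[0] for name in layer_names}
--     for layer in ('layer1', 'layer2', 'layer3', 'layer4'):
--         if layer in prefixes:
--             return layer
--     return layer_names[0]
-- ===== Notes on version B (the rewrite author's own statement) =====
-- stated objective: idiomatic
-- what changed: Instead of scanning layer_names while tracking a running minimum index into layer_order, B builds the set of prefixes once and loops over the fixed canonical order with an early return, eliminating list.index and the min-tracking state.
import Mathlib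
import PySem

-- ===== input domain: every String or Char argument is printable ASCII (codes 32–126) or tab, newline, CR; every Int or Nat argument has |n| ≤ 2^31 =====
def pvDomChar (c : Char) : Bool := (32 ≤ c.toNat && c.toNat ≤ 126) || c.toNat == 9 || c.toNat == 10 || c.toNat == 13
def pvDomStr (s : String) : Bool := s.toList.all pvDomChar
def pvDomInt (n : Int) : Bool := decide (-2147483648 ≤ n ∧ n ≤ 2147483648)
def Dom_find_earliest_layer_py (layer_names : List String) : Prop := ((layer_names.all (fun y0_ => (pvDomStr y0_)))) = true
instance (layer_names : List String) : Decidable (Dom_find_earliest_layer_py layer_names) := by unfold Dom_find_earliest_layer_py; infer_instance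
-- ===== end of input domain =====

-- B replaces A's scan with a running minimum index by a prefix set plus an early-return
-- loop over the fixed canonical layer order (objective: idiomatic; return value only).

-- ===== PORT A =====
-- name.split('[')[0]: '[' is a nonempty separator, so split? is some and the list is
-- nonempty — getD/headD are exact here
def pyPrefix (name : String) : String := ((PySem.Str.split? name "[").getD []).headD ""

-- the body of A's for-loop over (earliest_idx, earliest_name); float('inf') is modelled
-- by `none` in the index component (idx < inf is always true)
def pyStepA (st : Option Nat × Option String) (name : String) : Option Nat × Option String :=
  let layer_order : List String := ["layer1", "layer2", "layer3", "layer4"]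
  let layer_prefix := pyPrefix name
  if layer_order.contains layer_prefix then
    match PySem.List.index? layer_order layer_prefix with
    | some idx =>
        match st.1 with
        | none => (some idx, some layer_prefix)
        | some e => if idx < e then (some idx, some layer_prefix) else st
    | none => st
  else st

-- earliest_name is a nonempty canonical name whenever set, so Python's truthiness test
-- is exactly the Option match; layer_names[0] needs Pre_ (nonempty list)
def find_earliest_layer_py (layer_names : List String) : String :=
  match (layer_names.foldl pyStepA ((none : Option Nat), (none : Option String))).2 with
  | some n => n
  | none => layer_names.headD ""

-- ===== PORT B =====
def find_earliest_layer_py_alt (layer_names : List String) : String :=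
  match (["layer1", "layer2", "layer3", "layer4"] : List String).find?
      (fun layer => PySem.Set.contains (PySem.Set.ofList (layer_names.map pyPrefix)) layer) with
  | some layer => layer
  | none => layer_names.headD ""

-- ===== PRECONDITION & SPEC =====
-- Pre_ excludes only the empty list, on which both A and B raise IndexError at layer_names[0].
def Pre_find_earliest_layer_py (layer_names : List String) : Prop := layer_names ≠ []
instance (layer_names : List String) : Decidable (Pre_find_earliest_layer_py layer_names) := by unfold Pre_find_earliest_layer_py; infer_instance

def pvWitness_find_earliest_layer_py : List String := ["conv1", "layer2[0]", "layer1"]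

def Spec_find_earliest_layer_py (layer_names : List String) (out : String) : Prop := out = find_earliest_layer_py_alt layer_names
instance (layer_names : List String) (out : String) : Decidable (Spec_find_earliest_layer_py layer_names out) := by unfold Spec_find_earliest_layer_py; infer_instance

-- ===== CLAIM (what is proved, stated in full; the proofs are below) =====
def Claim_equal_find_earliest_layer_py : Prop := ∀ (layer_names : List String), Dom_find_earliest_layer_py layer_names → Pre_find_earliest_layer_py layer_names → Spec_find_earliest_layer_py layer_names (find_earliest_layer_py layer_names)

-- ===== LEMMAS AND PROOFS =====

def pvOrd : List String := ["layer1", "layer2", "layer3", "layer4"]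

def pvRank (p : String) : Option Nat := PySem.List.index? pvOrd p

-- A's accumulator is determined by its index component
def pvStOf : Option Nat → Option Nat × Option String
  | none => (none, none)
  | some i => (some i, some (pvOrd.getD i ""))

-- Python's min-tracking: keep the old index on a tie, take the new only if strictly smaller
def pvMinO : Option Nat → Option Nat → Option Nat
  | a, none => a
  | none, some i => some i
  | some e, some i => if i < e then some i else some e

lemma pvRank_cases (p : String) :
    pvRank p = (if p = "layer1" then some 0 else if p = "layer2" then some 1
      else if p = "layer3" then some 2 else if p = "layer4" then some 3 else none) := by
  simp only [pvRank, pvOrd, PySem.List.index?_eq_idxOf?]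
  split_ifs with h1 h2 h3 h4 <;> subst_eqs <;> (try rfl)
  simp [List.idxOf?, List.findIdx?_cons, beq_iff_eq, Ne.symm h1, Ne.symm h2, Ne.symm h3, Ne.symm h4]

lemma pvStep_eq (j : Option Nat) (name : String) :
    pyStepA (pvStOf j) name = pvStOf (pvMinO j (pvRank (pyPrefix name))) := by
  have h := pvRank_cases (pyPrefix name)
  unfold pyStepA
  by_cases h1 : pyPrefix name = "layer1" <;> by_cases h2 : pyPrefix name = "layer2" <;>
    by_cases h3 : pyPrefix name = "layer3" <;> by_cases h4 : pyPrefix name = "layer4" <;>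
      simp only [h1, h2, h3, h4, if_pos, if_neg, if_true, if_false] at h <;>
        cases j <;>
          simp_all [pvStOf, pvMinO, pvOrd, pvRank, PySem.List.index?_eq_idxOf?,
            List.idxOf?, List.findIdx?_cons] <;>
            split_ifs <;> simp_all [pvStOf, pvOrd] <;> omega

lemma pvFoldA (L : List String) (j : Option Nat) :
    L.foldl pyStepA (pvStOf j)
      = pvStOf (L.foldl (fun acc name => pvMinO acc (pvRank (pyPrefix name))) j) := by
  induction L generalizing j with
  | nil => rfl
  | cons n L ih => rw [List.foldl_cons, pvStep_eq, List.foldl_cons]; exact ih _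

lemma pvFoldMin_pull (L : List String) (a b : Option Nat) :
    L.foldl (fun acc name => pvMinO acc (pvRank (pyPrefix name))) (pvMinO a b)
    = pvMinO a (L.foldl (fun acc name => pvMinO acc (pvRank (pyPrefix name))) b) := by
  induction L generalizing b with
  | nil => rfl
  | cons n L ih =>
    rw [List.foldl_cons, List.foldl_cons]
    rw [show pvMinO (pvMinO a b) (pvRank (pyPrefix n)) = pvMinO a (pvMinO b (pvRank (pyPrefix n))) by
      cases a <;> cases b <;> cases h : pvRank (pyPrefix n) <;>
        simp only [pvMinO] <;> (try split_ifs) <;>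
          simp only [pvMinO] <;> (try split_ifs) <;> (try simp_all) <;> omega]
    exact ih _

set_option maxHeartbeats 1000000 in
lemma pvM_eq (L : List String) :
    L.foldl (fun acc name => pvMinO acc (pvRank (pyPrefix name))) none
    = (if "layer1" ∈ L.map pyPrefix then some 0
       else if "layer2" ∈ L.map pyPrefix then some 1
       else if "layer3" ∈ L.map pyPrefix then some 2
       else if "layer4" ∈ L.map pyPrefix then some 3 else none) := by
  induction L with
  | nil => simp
  | cons n L ih =>
    rw [List.foldl_cons]
    have hswap : pvMinO none (pvRank (pyPrefix n)) = pvMinO (pvRank (pyPrefix n)) none := by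
      cases h : pvRank (pyPrefix n) <;> simp [pvMinO]
    rw [hswap, pvFoldMin_pull, ih, pvRank_cases]
    simp only [List.map_cons, List.mem_cons]
    have e1 : ("layer1" = pyPrefix n) ↔ (pyPrefix n = "layer1") := eq_comm
    have e2 : ("layer2" = pyPrefix n) ↔ (pyPrefix n = "layer2") := eq_comm
    have e3 : ("layer3" = pyPrefix n) ↔ (pyPrefix n = "layer3") := eq_comm
    have e4 : ("layer4" = pyPrefix n) ↔ (pyPrefix n = "layer4") := eq_comm
    by_cases h1 : pyPrefix n = "layer1" <;> by_cases h2 : pyPrefix n = "layer2" <;>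
      by_cases h3 : pyPrefix n = "layer3" <;> by_cases h4 : pyPrefix n = "layer4" <;>
        by_cases m1 : "layer1" ∈ L.map pyPrefix <;> by_cases m2 : "layer2" ∈ L.map pyPrefix <;>
          by_cases m3 : "layer3" ∈ L.map pyPrefix <;> by_cases m4 : "layer4" ∈ L.map pyPrefix <;>
            simp_all [pvMinO, e1, e2, e3, e4] <;> (try (split_ifs <;> simp_all [pvMinO]))

lemma pvB_char (L : List String) :
    find_earliest_layer_py_alt L
    = (if "layer1" ∈ L.map pyPrefix then "layer1"
       else if "layer2" ∈ L.map pyPrefix then "layer2"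
       else if "layer3" ∈ L.map pyPrefix then "layer3"
       else if "layer4" ∈ L.map pyPrefix then "layer4" else L.headD "") := by
  unfold find_earliest_layer_py_alt
  have hmem : ∀ s : String,
      PySem.Set.contains (PySem.Set.ofList (L.map pyPrefix)) s = decide (s ∈ L.map pyPrefix) := by
    intro s
    have h2 : PySem.Set.contains (PySem.Set.ofList (L.map pyPrefix)) s = true ↔ s ∈ L.map pyPrefix := by
      rw [PySem.Set.contains_iff]
      exact PySem.Set.mem_ofList _ _
    cases hc : PySem.Set.contains (PySem.Set.ofList (L.map pyPrefix)) s
    · simp_all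
    · simp [h2.mp hc]
  simp only [List.find?, hmem]
  by_cases m1 : "layer1" ∈ L.map pyPrefix <;> by_cases m2 : "layer2" ∈ L.map pyPrefix <;>
    by_cases m3 : "layer3" ∈ L.map pyPrefix <;> by_cases m4 : "layer4" ∈ L.map pyPrefix <;>
      simp [m1, m2, m3, m4]

-- ===== VERDICT (by name: the statement is the Claim_ definition above) =====
theorem find_earliest_layer_py_spec : Claim_equal_find_earliest_layer_py := by
  intro L _hdom _hpre
  unfold Spec_find_earliest_layer_py
  rw [pvB_char]
  show find_earliest_layer_py L = _
  unfold find_earliest_layer_py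
  rw [show ((none : Option Nat), (none : Option String)) = pvStOf none from rfl,
    pvFoldA, pvM_eq]
  by_cases m1 : "layer1" ∈ L.map pyPrefix <;> by_cases m2 : "layer2" ∈ L.map pyPrefix <;>
    by_cases m3 : "layer3" ∈ L.map pyPrefix <;> by_cases m4 : "layer4" ∈ L.map pyPrefix <;>
      simp [m1, m2, m3, m4, pvStOf, pvOrd]
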